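-- pv_equiv track=rewrite | github.com/jcolinpatrick/kryptos | scripts/two_system/e_mitm_mono_transposition.py | _diagonal_order
-- ===== SOURCE A (Python) =====
-- from typing import Dict, List, Optional, Set, Tuple
--
-- def _diagonal_order(n_rows: int, n_cols: int, direction: str) -> List[int]:
--     """Read grid diagonally."""
--     order = []
--     if direction == "tl_br":
--         for diag in range(n_rows + n_cols - 1):
--             for r in range(max(0, diag - n_cols + 1), min(n_rows, diag + 1)):
--                 c = diag - r
--                 if c < n_cols:
--                     order.append(r * n_cols + c)
--     else:  # tr_bl
--         for diag in range(n_rows + n_cols - 1):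
--             for r in range(max(0, diag - n_cols + 1), min(n_rows, diag + 1)):
--                 c = (n_cols - 1) - (diag - r)
--                 if 0 <= c < n_cols:
--                     order.append(r * n_cols + c)
--     return order
-- ===== SOURCE B (Python) =====
-- from typing import List
--
-- def _diagonal_order(n_rows: int, n_cols: int, direction: str) -> List[int]:
--     """Read grid diagonally: one row-major pass into diagonal buckets, then flatten."""
--     buckets: List[List[int]] = [[] for _ in range(n_rows + n_cols - 1)]
--     for r in range(n_rows):
--         for c in range(n_cols):
--             key = r + c if direction == "tl_br" else r + (n_cols - 1 - c)
--             buckets[key].append(r * n_cols + c)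
--     return [i for bucket in buckets for i in bucket]
-- ===== Notes on version B (the rewrite author's own statement) =====
-- stated objective: alternative
-- what changed: Replaces A's per-diagonal nested loops with their max/min bounds arithmetic by a single row-major pass that appends each cell index into a diagonal-keyed bucket table and then flattens the buckets.
import Mathlib
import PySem

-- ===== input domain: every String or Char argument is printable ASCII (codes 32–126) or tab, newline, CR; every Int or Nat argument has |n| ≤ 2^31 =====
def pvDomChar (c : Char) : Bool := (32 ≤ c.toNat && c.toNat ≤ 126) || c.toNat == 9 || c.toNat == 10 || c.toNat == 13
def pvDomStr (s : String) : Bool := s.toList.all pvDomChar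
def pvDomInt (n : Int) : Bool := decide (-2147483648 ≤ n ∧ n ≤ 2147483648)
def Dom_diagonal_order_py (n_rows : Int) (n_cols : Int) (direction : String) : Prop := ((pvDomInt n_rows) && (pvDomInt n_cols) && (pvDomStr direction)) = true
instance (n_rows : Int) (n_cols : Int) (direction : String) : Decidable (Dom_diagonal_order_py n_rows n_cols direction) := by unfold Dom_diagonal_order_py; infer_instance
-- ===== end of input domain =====

-- B replaces A's per-diagonal nested loops (with their bounds arithmetic) by one row-major
-- pass that drops each cell into a diagonal-indexed bucket table and then flattens it;
-- objective: alternative (same cost, different data structure).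

-- ===== PORT A =====
def diagonal_order_py (n_rows : Int) (n_cols : Int) (direction : String) : List Int :=
  let order : List Int := []
  if direction == "tl_br" then
    (PySem.List.pyRange 0 (n_rows + n_cols - 1) 1).foldl
      (fun order diag =>
        (PySem.List.pyRange (max 0 (diag - n_cols + 1)) (min n_rows (diag + 1)) 1).foldl
          (fun order r =>
            let c := diag - r
            if c < n_cols then order ++ [r * n_cols + c] else order)
          order)
      order
  else
    (PySem.List.pyRange 0 (n_rows + n_cols - 1) 1).foldl
      (fun order diag =>
        (PySem.List.pyRange (max 0 (diag - n_cols + 1)) (min n_rows (diag + 1)) 1).foldl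
          (fun order r =>
            let c := (n_cols - 1) - (diag - r)
            if 0 ≤ c ∧ c < n_cols then order ++ [r * n_cols + c] else order)
          order)
      order

-- ===== PORT B =====
def diagonal_order_py_alt (n_rows : Int) (n_cols : Int) (direction : String) : List Int :=
  let buckets : List (List Int) :=
    (PySem.List.pyRange 0 n_rows 1).foldl
      (fun bs r =>
        (PySem.List.pyRange 0 n_cols 1).foldl
          (fun bs c =>
            let key : Int := if direction == "tl_br" then r + c else r + (n_cols - 1 - c)
            -- buckets[key].append(r * n_cols + c): inside these loops 0 ≤ key < n_rows + n_cols - 1,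
            -- so List.modify at key.toNat is exactly Python's in-range bucket append
            bs.modify key.toNat (fun b => b ++ [r * n_cols + c]))
          bs)
      (List.replicate (n_rows + n_cols - 1).toNat [])
  buckets.flatten

-- ===== PRECONDITION & SPEC =====
def Spec_diagonal_order_py (n_rows : Int) (n_cols : Int) (direction : String) (out : List Int) : Prop := out = diagonal_order_py_alt n_rows n_cols direction
instance (n_rows : Int) (n_cols : Int) (direction : String) (out : List Int) : Decidable (Spec_diagonal_order_py n_rows n_cols direction out) := by unfold Spec_diagonal_order_py; infer_instance

-- ===== CLAIM (what is proved, stated in full; the proofs are below) =====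
def Claim_equal_diagonal_order_py : Prop := ∀ (n_rows : Int) (n_cols : Int) (direction : String), Dom_diagonal_order_py n_rows n_cols direction → Spec_diagonal_order_py n_rows n_cols direction (diagonal_order_py n_rows n_cols direction)

-- ===== LEMMAS AND PROOFS =====

-- the diagonal key of cell (r, c), as computed by B
def pvKey (n_cols : Int) (direction : String) (r c : Int) : Int :=
  if direction == "tl_br" then r + c else r + (n_cols - 1 - c)

-- the column of row r on diagonal d, as computed by A
def pvCof (n_cols : Int) (direction : String) (d r : Int) : Int :=
  if direction == "tl_br" then d - r else n_cols - 1 - (d - r)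

-- the rows A visits on diagonal d
def pvBand (n_rows n_cols d : Int) : List Int :=
  PySem.List.pyRange (max 0 (d - n_cols + 1)) (min n_rows (d + 1)) 1

-- A's contribution of diagonal d
def pvDiag (n_rows n_cols : Int) (direction : String) (d : Int) : List Int :=
  (pvBand n_rows n_cols d).map (fun r => r * n_cols + pvCof n_cols direction d r)

-- B's elementary bucket update
def pvStep (bs : List (List Int)) (p : Int × Int) : List (List Int) :=
  bs.modify p.1.toNat (fun b => b ++ [p.2])

-- the (key, value) pairs B processes, in row-major order
def pvCells (n_rows n_cols : Int) (direction : String) : List (Int × Int) :=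
  (PySem.List.pyRange 0 n_rows 1).flatMap (fun r =>
    (PySem.List.pyRange 0 n_cols 1).map (fun c => (pvKey n_cols direction r c, r * n_cols + c)))

lemma pvA_canon (n_rows n_cols : Int) (direction : String) :
    diagonal_order_py n_rows n_cols direction =
      (PySem.List.pyRange 0 (n_rows + n_cols - 1) 1).flatMap (pvDiag n_rows n_cols direction) := by
  unfold diagonal_order_py
  by_cases hdir : (direction == "tl_br") = true
  · rw [if_pos hdir]
    rw [PySem.List.foldl_congr_mem _ _ (fun acc d => acc ++ pvDiag n_rows n_cols direction d) _
      (by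
        intro acc d _
        rw [PySem.List.foldl_congr_mem _ _ (fun acc r => acc ++ [r * n_cols + (d - r)]) acc
          (by
            intro a r hr
            rw [PySem.List.mem_pyRange_one] at hr
            show (if d - r < n_cols then a ++ [r * n_cols + (d - r)] else a) = _
            rw [if_pos (by omega)])]
        rw [PySem.List.foldl_append_singleton_eq_map]
        unfold pvDiag pvBand pvCof
        rw [hdir]
        simp)]
    rw [PySem.List.foldl_append_eq_flatMap]
    simp
  · rw [if_neg hdir]
    rw [PySem.List.foldl_congr_mem _ _ (fun acc d => acc ++ pvDiag n_rows n_cols direction d) _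
      (by
        intro acc d _
        rw [PySem.List.foldl_congr_mem _ _
              (fun acc r => acc ++ [r * n_cols + (n_cols - 1 - (d - r))]) acc
          (by
            intro a r hr
            rw [PySem.List.mem_pyRange_one] at hr
            show (if 0 ≤ (n_cols - 1) - (d - r) ∧ (n_cols - 1) - (d - r) < n_cols
                  then a ++ [r * n_cols + ((n_cols - 1) - (d - r))] else a) = _
            rw [if_pos (by omega)])]
        rw [PySem.List.foldl_append_singleton_eq_map]
        unfold pvDiag pvBand pvCof
        simp [hdir])]
    rw [PySem.List.foldl_append_eq_flatMap]
    simp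

lemma pvFold_getElem? (ops : List (Int × Int)) :
    ∀ (bs : List (List Int)) (j : Nat),
      (ops.foldl pvStep bs)[j]? =
        bs[j]?.map (fun b => b ++ (ops.filter (fun p => p.1.toNat == j)).map Prod.snd) := by
  induction ops with
  | nil => intro bs j; simp
  | cons p ops ih =>
    intro bs j
    simp only [List.foldl_cons, List.filter_cons]
    rw [ih]
    by_cases h : p.1.toNat = j
    · simp [pvStep, h]
      cases bs[j]? <;> simp
    · simp [pvStep, h]

lemma pvAlt_canon (n_rows n_cols : Int) (direction : String) :
    diagonal_order_py_alt n_rows n_cols direction =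
      (List.range (n_rows + n_cols - 1).toNat).flatMap (fun k =>
        ((pvCells n_rows n_cols direction).filter (fun p => p.1.toNat == k)).map Prod.snd) := by
  unfold diagonal_order_py_alt
  have h1 :
      (PySem.List.pyRange 0 n_rows 1).foldl
        (fun bs r =>
          (PySem.List.pyRange 0 n_cols 1).foldl
            (fun bs c =>
              let key : Int := if direction == "tl_br" then r + c else r + (n_cols - 1 - c)
              bs.modify key.toNat (fun b => b ++ [r * n_cols + c]))
            bs)
        (List.replicate (n_rows + n_cols - 1).toNat []) =
      (pvCells n_rows n_cols direction).foldl pvStep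
        (List.replicate (n_rows + n_cols - 1).toNat []) := by
    unfold pvCells
    rw [List.foldl_flatMap]
    apply PySem.List.foldl_congr_mem
    intro bs r _
    rw [List.foldl_map]
    rfl
  rw [h1]
  have h2 :
      (pvCells n_rows n_cols direction).foldl pvStep
          (List.replicate (n_rows + n_cols - 1).toNat []) =
        (List.range (n_rows + n_cols - 1).toNat).map (fun k =>
          ((pvCells n_rows n_cols direction).filter (fun p => p.1.toNat == k)).map Prod.snd) := by
    apply List.ext_getElem?
    intro j
    rw [pvFold_getElem?]
    by_cases hj : j < (n_rows + n_cols - 1).toNat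
    · rw [List.getElem?_map, List.getElem?_range hj]
      simp only [List.getElem?_replicate, if_pos hj, Option.map_some]
      rfl
    · rw [List.getElem?_map]
      have : (List.range (n_rows + n_cols - 1).toNat)[j]? = none := by
        simp; omega
      simp only [this, List.getElem?_replicate, if_neg hj, Option.map_none]
  rw [h2, ← List.flatMap_def]

lemma pv_filter_eq (a b t : Int) :
    (PySem.List.pyRange a b 1).filter (fun c => c == t) =
      if a ≤ t ∧ t < b then [t] else [] := by
  by_cases h : a ≤ t ∧ t < b
  · rw [if_pos h]
    have h1 : (PySem.List.pyRange a t 1).filter (fun c => c == t) = [] := by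
      apply List.filter_eq_nil_iff.mpr
      intro x hx
      rw [PySem.List.mem_pyRange_one] at hx
      simp; omega
    have h3 : (PySem.List.pyRange (t + 1) b 1).filter (fun c => c == t) = [] := by
      apply List.filter_eq_nil_iff.mpr
      intro x hx
      rw [PySem.List.mem_pyRange_one] at hx
      simp; omega
    have h2 : (PySem.List.pyRange t (t + 1) 1).filter (fun c => c == t) = [t] := by
      rw [PySem.List.pyRange_one_singleton]; simp
    rw [PySem.List.pyRange_one_append a t b (by omega) (by omega),
        PySem.List.pyRange_one_append t (t + 1) b (by omega) (by omega),
        List.filter_append, List.filter_append, h1, h2, h3]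
    simp
  · rw [if_neg h]
    apply List.filter_eq_nil_iff.mpr
    intro x hx
    rw [PySem.List.mem_pyRange_one] at hx
    simp; omega

-- cells-with-condition over the full row range collapse to A's band of diagonal d
lemma pv_flatMap_band (m n d : Int) (g : Int → Int) (hd : 0 ≤ d) (hk : d < m + n - 1)
    (hg : ∀ r, (0 ≤ g r ∧ g r < n) ↔ (d - n + 1 ≤ r ∧ r ≤ d)) :
    (PySem.List.pyRange 0 m 1).flatMap
        (fun r => if 0 ≤ g r ∧ g r < n then [r * n + g r] else []) =
      (pvBand m n d).map (fun r => r * n + g r) := by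
  rcases le_or_gt m 0 with hm | hm
  · rw [PySem.List.pyRange_one_eq_nil hm]
    unfold pvBand
    rw [PySem.List.pyRange_one_eq_nil (by omega)]
    rfl
  rcases le_or_gt n 0 with hn | hn
  · rw [List.flatMap_eq_nil_iff.mpr (by
      intro r hr
      rw [if_neg (by omega)])]
    unfold pvBand
    rw [PySem.List.pyRange_one_eq_nil (by omega)]
    rfl
  · have e1 : (PySem.List.pyRange 0 (max 0 (d - n + 1)) 1).flatMap
        (fun r => if 0 ≤ g r ∧ g r < n then [r * n + g r] else []) = [] := by
      apply List.flatMap_eq_nil_iff.mpr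
      intro r hr
      rw [PySem.List.mem_pyRange_one] at hr
      rw [if_neg (by rw [hg]; omega)]
    have e3 : (PySem.List.pyRange (min m (d + 1)) m 1).flatMap
        (fun r => if 0 ≤ g r ∧ g r < n then [r * n + g r] else []) = [] := by
      apply List.flatMap_eq_nil_iff.mpr
      intro r hr
      rw [PySem.List.mem_pyRange_one] at hr
      rw [if_neg (by rw [hg]; omega)]
    have e2 : (PySem.List.pyRange (max 0 (d - n + 1)) (min m (d + 1)) 1).flatMap
        (fun r => if 0 ≤ g r ∧ g r < n then [r * n + g r] else []) =
        (PySem.List.pyRange (max 0 (d - n + 1)) (min m (d + 1)) 1).flatMap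
          (fun r => [r * n + g r]) := by
      apply List.flatMap_congr
      intro r hr
      rw [PySem.List.mem_pyRange_one] at hr
      rw [if_pos (by rw [hg]; omega)]
    rw [PySem.List.pyRange_one_append 0 (max 0 (d - n + 1)) m (by omega) (by omega),
        PySem.List.pyRange_one_append (max 0 (d - n + 1)) (min m (d + 1)) m (by omega) (by omega),
        List.flatMap_append, List.flatMap_append, e1, e2, e3]
    unfold pvBand
    rw [List.nil_append, List.append_nil, ← List.map_eq_flatMap]

lemma pv_perDiag (n_rows n_cols : Int) (direction : String) (k : Nat)
    (hk : (k : Int) < n_rows + n_cols - 1) :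
    ((pvCells n_rows n_cols direction).filter (fun p => p.1.toNat == k)).map Prod.snd =
      pvDiag n_rows n_cols direction (k : Int) := by
  unfold pvCells
  rw [List.filter_flatMap, List.map_flatMap]
  unfold pvDiag
  rw [← pv_flatMap_band n_rows n_cols (k : Int) (pvCof n_cols direction (k : Int))
        (by omega) hk
        (by
          intro r
          unfold pvCof
          by_cases hdir : (direction == "tl_br") = true <;> simp [hdir] <;> omega)]
  apply List.flatMap_congr
  intro r hr
  rw [PySem.List.mem_pyRange_one] at hr
  rw [List.filter_map]
  rw [List.filter_congr (q := fun c => c == pvCof n_cols direction (k : Int) r) (by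
    intro c hc
    rw [PySem.List.mem_pyRange_one] at hc
    rw [Bool.eq_iff_iff]
    simp only [Function.comp_apply, beq_iff_eq]
    unfold pvKey pvCof
    by_cases hdir : (direction == "tl_br") = true <;> simp [hdir] <;> omega)]
  rw [pv_filter_eq]
  by_cases hc : 0 ≤ pvCof n_cols direction (k : Int) r ∧ pvCof n_cols direction (k : Int) r < n_cols
  · rw [if_pos hc, if_pos hc]
    simp
  · rw [if_neg hc, if_neg hc]
    rfl

-- ===== VERDICT (by name: the statement is the Claim_ definition above) =====
theorem diagonal_order_py_spec : Claim_equal_diagonal_order_py := by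
  intro n_rows n_cols direction _
  unfold Spec_diagonal_order_py
  rw [pvA_canon, pvAlt_canon]
  rw [PySem.List.pyRange_zero, List.flatMap_map]
  apply List.flatMap_congr
  intro k hk
  rw [List.mem_range] at hk
  rw [pv_perDiag n_rows n_cols direction k (by omega)]
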